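-- pv_equiv track=rewrite | github.com/CGCL-codes/Toma | Tokenization_and_FeatureExtraction.py | intersection_and_union
-- ===== SOURCE A (Python) =====
-- def intersection_and_union(group1, group2):
--     intersection = 0
--     union = 0
--     triads_num1 = {}
--     triads_num2 = {}
--     for triad1 in group1:
--         triads_num1[triad1] = triads_num1.get(triad1, 0) + 1
--     for triad2 in group2:
--         triads_num2[triad2] = triads_num2.get(triad2, 0) + 1
--
--     for triad in list(set(group1).union(set(group2))):
--         intersection += min(triads_num1.get(triad, 0), triads_num2.get(triad, 0))
--         union += max(triads_num1.get(triad, 0), triads_num2.get(triad, 0))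
--     return intersection, union
-- ===== SOURCE B (Python) =====
-- def intersection_and_union(group1, group2):
--     need = {}
--     for t in group1:
--         need[t] = need.get(t, 0) + 1
--     intersection = 0
--     for t in group2:
--         if need.get(t, 0) > 0:
--             need[t] = need[t] - 1
--             intersection += 1
--     return intersection, len(group1) + len(group2) - intersection
-- ===== Notes on version B (the rewrite author's own statement) =====
-- stated objective: faster
-- what changed: Replaces the second counter and the min/max accumulation loop over the union key set by a single greedy pass over group2 that consumes counts of group1 (intersection), deriving union as len1+len2-intersection via the identity min+max=a+b.
import Mathlib
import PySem

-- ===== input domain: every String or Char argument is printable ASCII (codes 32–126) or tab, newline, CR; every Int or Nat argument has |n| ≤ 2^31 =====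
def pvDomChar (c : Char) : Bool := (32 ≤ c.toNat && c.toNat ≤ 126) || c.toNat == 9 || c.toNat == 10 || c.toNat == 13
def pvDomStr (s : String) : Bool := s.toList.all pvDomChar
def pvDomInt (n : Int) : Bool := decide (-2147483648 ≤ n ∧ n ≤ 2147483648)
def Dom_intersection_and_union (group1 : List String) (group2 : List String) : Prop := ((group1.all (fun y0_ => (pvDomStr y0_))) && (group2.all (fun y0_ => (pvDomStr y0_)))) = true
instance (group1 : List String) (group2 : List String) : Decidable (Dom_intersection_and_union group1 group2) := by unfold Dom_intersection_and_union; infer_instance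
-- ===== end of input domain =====

-- B replaces the second counter and the min/max loop over the union key set by a single
-- greedy pass over group2 consuming counts of group1; union = len1 + len2 - intersection.

-- ===== PORT A =====
def intersection_and_union (group1 : List String) (group2 : List String) : Int × Int :=
  let triads_num1 := group1.foldl (fun d x => d.insert x (d.getD x 0 + 1)) PySem.Dict.empty
  let triads_num2 := group2.foldl (fun d x => d.insert x (d.getD x 0 + 1)) PySem.Dict.empty
  -- sum over the union set: the accumulated sums are independent of the set's iteration order
  (PySem.Set.union (PySem.Set.ofList group1) (PySem.Set.ofList group2)).foldl
    (fun (acc : Int × Int) k =>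
      (acc.1 + min (triads_num1.getD k 0) (triads_num2.getD k 0),
       acc.2 + max (triads_num1.getD k 0) (triads_num2.getD k 0))) (0, 0)

-- ===== PORT B =====
def altLoop (l : List String) (need : PySem.Dict String Int) (inter : Int) : Int :=
  match l with
  | [] => inter
  | x :: rest =>
    if need.getD x 0 > 0 then altLoop rest (need.insert x (need.getD x 0 - 1)) (inter + 1)
    else altLoop rest need inter

def intersection_and_union_alt (group1 : List String) (group2 : List String) : Int × Int :=
  let need := group1.foldl (fun d x => d.insert x (d.getD x 0 + 1)) PySem.Dict.empty
  let inter := altLoop group2 need 0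
  (inter, (group1.length : Int) + (group2.length : Int) - inter)

-- ===== PRECONDITION & SPEC =====
def Spec_intersection_and_union (group1 : List String) (group2 : List String) (out : Int × Int) : Prop := out = intersection_and_union_alt group1 group2
instance (group1 : List String) (group2 : List String) (out : Int × Int) : Decidable (Spec_intersection_and_union group1 group2 out) := by unfold Spec_intersection_and_union; infer_instance

-- ===== CLAIM (what is proved, stated in full; the proofs are below) =====
def Claim_equal_intersection_and_union : Prop := ∀ (group1 : List String) (group2 : List String), Dom_intersection_and_union group1 group2 → Spec_intersection_and_union group1 group2 (intersection_and_union group1 group2)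

-- ===== LEMMAS AND PROOFS =====

lemma pair_foldl (l : List String) (f g : String → Int) (a b : Int) :
    l.foldl (fun (acc : Int × Int) k => (acc.1 + f k, acc.2 + g k)) (a, b)
      = (a + (l.map f).sum, b + (l.map g).sum) := by
  induction l generalizing a b with
  | nil => simp
  | cons x rest ih => simp [ih]; constructor <;> ring

lemma sum_nodup (l : List String) (f : String → Int) (h : l.Nodup) :
    (l.map f).sum = ∑ k ∈ l.toFinset, f k := by
  rw [List.sum_toFinset _ h]

lemma counter_getD (l : List String) (v : String) :
    (l.foldl (fun d x => d.insert x (d.getD x 0 + 1)) PySem.Dict.empty).getD v 0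
      = (l.count v : Int) := by
  rw [PySem.Dict.getD_foldl_insert_add_one]
  simp

lemma altLoop_eq (l : List String) (d : PySem.Dict String Int) (inter : Int)
    (hd : ∀ k, 0 ≤ d.getD k 0) :
    altLoop l d inter = inter + ∑ k ∈ l.toFinset, min (d.getD k 0) (l.count k : Int) := by
  induction l generalizing d inter with
  | nil => simp [altLoop]
  | cons x rest ih =>
    have hcnt : ∀ k : String, ((x :: rest).count k : Int)
        = (rest.count k : Int) + (if k = x then 1 else 0) := by
      intro k
      by_cases h : k = x
      · subst h; simp
      · simp [h, (Ne.symm h : ¬ x = k)]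
    by_cases hpos : d.getD x 0 > 0
    · have hd' : ∀ k, 0 ≤ (d.insert x (d.getD x 0 - 1)).getD k 0 := by
        intro k
        rw [PySem.Dict.getD_insert]
        split
        · omega
        · exact hd k
      rw [altLoop, if_pos hpos, ih _ _ hd']
      by_cases hx : x ∈ rest.toFinset
      · have hins : (x :: rest).toFinset = rest.toFinset := by
          simp [List.toFinset_cons, Finset.insert_eq_self.mpr hx]
        rw [hins]
        rw [← Finset.add_sum_erase _ _ hx, ← Finset.add_sum_erase _ _ hx]
        have hx' : (d.insert x (d.getD x 0 - 1)).getD x 0 = d.getD x 0 - 1 := by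
          rw [PySem.Dict.getD_insert]; simp
        have hterms : ∑ k ∈ rest.toFinset.erase x,
            min ((d.insert x (d.getD x 0 - 1)).getD k 0) (rest.count k : Int)
            = ∑ k ∈ rest.toFinset.erase x,
            min (d.getD k 0) ((x :: rest).count k : Int) := by
          apply Finset.sum_congr rfl
          intro k hk
          have hkx : k ≠ x := Finset.ne_of_mem_erase hk
          rw [PySem.Dict.getD_insert, if_neg hkx, hcnt, if_neg hkx]
          ring_nf
        rw [hterms, hx', hcnt x, if_pos rfl]
        omega
      · have hcx : (rest.count x : Int) = 0 := by
          simp [List.count_eq_zero_of_not_mem (by simpa using hx)]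
        have hterms : ∑ k ∈ rest.toFinset,
            min ((d.insert x (d.getD x 0 - 1)).getD k 0) (rest.count k : Int)
            = ∑ k ∈ rest.toFinset,
            min (d.getD k 0) ((x :: rest).count k : Int) := by
          apply Finset.sum_congr rfl
          intro k hk
          have hkx : k ≠ x := by rintro rfl; exact hx hk
          rw [PySem.Dict.getD_insert, if_neg hkx, hcnt, if_neg hkx]
          ring_nf
        rw [List.toFinset_cons, Finset.sum_insert hx, hterms, hcnt x, if_pos rfl, hcx]
        have : min (d.getD x 0) (0 + 1) = 1 := by omega
        rw [this]
        ring
    · have hx0 : d.getD x 0 = 0 := le_antisymm (by omega) (hd x)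
      rw [altLoop, if_neg hpos, ih _ _ hd]
      by_cases hx : x ∈ rest.toFinset
      · have hins : (x :: rest).toFinset = rest.toFinset := by
          simp [List.toFinset_cons, Finset.insert_eq_self.mpr hx]
        rw [hins]
        rw [← Finset.add_sum_erase _ _ hx, ← Finset.add_sum_erase _ _ hx]
        have hterms : ∑ k ∈ rest.toFinset.erase x,
            min (d.getD k 0) (rest.count k : Int)
            = ∑ k ∈ rest.toFinset.erase x,
            min (d.getD k 0) ((x :: rest).count k : Int) := by
          apply Finset.sum_congr rfl
          intro k hk
          have hkx : k ≠ x := Finset.ne_of_mem_erase hk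
          rw [hcnt, if_neg hkx]; ring_nf
        rw [hterms, hx0, hcnt x, if_pos rfl]
        have h1 : (0 : Int) ≤ (rest.count x : Int) := Int.natCast_nonneg _
        omega
      · have hterms : ∑ k ∈ rest.toFinset,
            min (d.getD k 0) (rest.count k : Int)
            = ∑ k ∈ rest.toFinset,
            min (d.getD k 0) ((x :: rest).count k : Int) := by
          apply Finset.sum_congr rfl
          intro k hk
          have hkx : k ≠ x := by rintro rfl; exact hx hk
          rw [hcnt, if_neg hkx]; ring_nf
        rw [List.toFinset_cons, Finset.sum_insert hx, hterms, hx0, hcnt x, if_pos rfl]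
        have : min (0 : Int) ((rest.count x : Int) + 1) = 0 := by
          have : (0 : Int) ≤ (rest.count x : Int) := Int.natCast_nonneg _
          omega
        omega

-- counts over a superset of the occurring keys sum to the length
lemma sum_count_superset (l : List String) (S : Finset String) (hS : l.toFinset ⊆ S) :
    ∑ k ∈ S, (l.count k : Int) = (l.length : Int) := by
  rw [← Finset.sum_subset hS (by intro k _ hk; simp [List.count_eq_zero_of_not_mem (by simpa using hk)])]
  push_cast [← List.sum_toFinset_count_eq_length l]
  rfl

-- ===== VERDICT (by name: the statement is the Claim_ definition above) =====
theorem intersection_and_union_spec : Claim_equal_intersection_and_union := by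
  intro g1 g2 _
  unfold Spec_intersection_and_union intersection_and_union intersection_and_union_alt
  dsimp only
  have hc1 := counter_getD g1
  have hc2 := counter_getD g2
  -- the union set of keys
  set S : List String := PySem.Set.union (PySem.Set.ofList g1) (PySem.Set.ofList g2) with hSdef
  have hnodup : S.Nodup := PySem.Set.nodup_union _ _ (PySem.Set.nodup_ofList _)
  have hmemS : ∀ k, k ∈ S ↔ k ∈ g1 ∨ k ∈ g2 := by
    intro k
    rw [hSdef, PySem.Set.mem_union]
    simp [PySem.Set.mem_ofList]
  have hT1 : g1.toFinset ⊆ S.toFinset := by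
    intro k hk; rw [List.mem_toFinset, hmemS]; left; simpa using hk
  have hT2 : g2.toFinset ⊆ S.toFinset := by
    intro k hk; rw [List.mem_toFinset, hmemS]; right; simpa using hk
  rw [pair_foldl, sum_nodup _ _ hnodup, sum_nodup _ _ hnodup,
    altLoop_eq _ _ _ (by intro k; rw [hc1]; exact Int.natCast_nonneg _)]
  simp only [hc1, hc2, zero_add]
  -- intersection: extend B's sum over g2's keys to all keys of S (extra terms are 0)
  have hinter : ∑ k ∈ g2.toFinset, min ((g1.count k : Int)) ((g2.count k : Int))
      = ∑ k ∈ S.toFinset, min ((g1.count k : Int)) ((g2.count k : Int)) := by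
    apply Finset.sum_subset hT2
    intro k _ hk
    have : (g2.count k : Int) = 0 := by
      simp [List.count_eq_zero_of_not_mem (by simpa using hk)]
    have h1 : (0 : Int) ≤ (g1.count k : Int) := Int.natCast_nonneg _
    omega
  rw [Prod.ext_iff]
  constructor
  · simp [hinter]
  · -- union: ∑ max = ∑ (c1 + c2) - ∑ min = len1 + len2 - intersection
    have hsum : ∑ k ∈ S.toFinset, max ((g1.count k : Int)) ((g2.count k : Int))
        = (g1.length : Int) + (g2.length : Int)
          - ∑ k ∈ S.toFinset, min ((g1.count k : Int)) ((g2.count k : Int)) := by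
      rw [← sum_count_superset g1 S.toFinset hT1, ← sum_count_superset g2 S.toFinset hT2,
        ← Finset.sum_add_distrib, ← Finset.sum_sub_distrib]
      apply Finset.sum_congr rfl
      intro k _
      omega
    simp [hsum, hinter]
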